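-- pv_equiv track=rewrite | github.com/Aidit-Models/CRISPR-AIdit | training-evaluation/benchmark-datasets/DSB/unifying_lindel_data_label_into_the_same_format.py | fix_index
-- ===== SOURCE A (Python) =====
-- def fix_index(Reference, Raw_reference, Guide_index):
--     i = 0
--     for j in range(Guide_index):
--         nucle = Raw_reference[j]
--         while Reference[i] != nucle:
--             i += 1
--         i += 1
--     return i
-- ===== SOURCE B (Python) =====
-- def fix_index(Reference, Raw_reference, Guide_index):
--     # Build a positional index once: for each character, the (increasing) list of
--     # its occurrence positions in Reference.  Each matched character is then
--     # resolved against its own occurrence list (first position >= i), instead of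
--     # scanning Reference character by character.
--     pos = {}
--     for idx, ch in enumerate(Reference):
--         pos.setdefault(ch, []).append(idx)
--     i = 0
--     for j in range(Guide_index):
--         lst = pos[Raw_reference[j]]
--         k = 0
--         while lst[k] < i:
--             k += 1
--         i = lst[k] + 1
--     return i
-- ===== Notes on version B (the rewrite author's own statement) =====
-- stated objective: alternative
-- what changed: Instead of A's nested scan over Reference, B builds a per-character occurrence-position index of Reference once and resolves each matched character by searching its own occurrence list for the first position >= i.
import Mathlib
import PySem

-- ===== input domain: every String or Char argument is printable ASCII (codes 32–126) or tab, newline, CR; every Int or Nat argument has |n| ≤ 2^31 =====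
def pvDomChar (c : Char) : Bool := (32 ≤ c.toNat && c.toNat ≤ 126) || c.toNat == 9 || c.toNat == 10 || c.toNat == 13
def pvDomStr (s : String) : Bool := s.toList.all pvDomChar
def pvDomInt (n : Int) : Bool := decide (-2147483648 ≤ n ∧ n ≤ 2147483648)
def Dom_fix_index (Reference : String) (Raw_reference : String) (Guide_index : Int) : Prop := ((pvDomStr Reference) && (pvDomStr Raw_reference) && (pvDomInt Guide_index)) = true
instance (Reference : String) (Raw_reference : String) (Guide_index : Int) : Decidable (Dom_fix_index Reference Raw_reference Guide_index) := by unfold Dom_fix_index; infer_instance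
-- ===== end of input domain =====

-- B replaces A's nested scan of Reference by a per-character occurrence-position index of
-- Reference built once, each matched character being resolved against its own occurrence
-- list (first position >= i); return value only, no side effects. Objective: alternative.

-- ===== PORT A =====
-- inner `while Reference[i] != nucle: i += 1` followed by `i += 1`; consumes the scanned prefix.
-- On the empty list (Python's IndexError, excluded by Pre_) it returns i unchanged.
def pvSkipA (ref : List Char) (c : Char) (i : Int) : Int × List Char :=
  match ref with
  | [] => (i, [])
  | r :: rs => if r = c then (i + 1, rs) else pvSkipA rs c (i + 1)

-- outer `for j in range(Guide_index)`: iterate over the first Guide_index characters of Raw_reference.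
def pvGoA (ref : List Char) (raw : List Char) (i : Int) : Int :=
  match raw with
  | [] => i
  | c :: cs =>
    let p := pvSkipA ref c i
    pvGoA p.2 cs p.1

def fix_index (Reference : String) (Raw_reference : String) (Guide_index : Int) : Int :=
  pvGoA Reference.toList (Raw_reference.toList.take Guide_index.toNat) 0

-- ===== PORT B =====
-- `pos.setdefault(ch, []).append(idx)` over enumerate(Reference): extend ch's occurrence list by idx.
def pvPosDict (l : List Char) : PySem.Dict Char (List Int) :=
  (PySem.List.enumerate l 0).foldl (fun d p => d.modify p.2 [] (· ++ [p.1])) PySem.Dict.empty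

-- `k = 0; while lst[k] < i: k += 1; return lst[k] + 1`; advancing k = dropping the head.
-- On running off the list (Python's IndexError/KeyError, excluded by Pre_) it returns i.
def pvScan (lst : List Int) (i : Int) : Int :=
  match lst with
  | [] => i
  | p :: ps => if p < i then pvScan ps i else p + 1

-- the `for j in range(Guide_index)` loop over the first Guide_index characters of Raw_reference.
def pvGoB (raw : List Char) (d : PySem.Dict Char (List Int)) (i : Int) : Int :=
  match raw with
  | [] => i
  | c :: cs => pvGoB cs d (pvScan (d.getD c []) i)

def fix_index_alt (Reference : String) (Raw_reference : String) (Guide_index : Int) : Int :=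
  pvGoB (Raw_reference.toList.take Guide_index.toNat) (pvPosDict Reference.toList) 0

-- ===== PRECONDITION & SPEC =====
-- Pre_: exactly the inputs on which Python A returns without an IndexError: every index j < Guide_index
-- is valid in Raw_reference, and the greedy left-to-right scan stays inside Reference, i.e.
-- Raw_reference[:Guide_index] is a subsequence of Reference (negative Guide_index gives the empty prefix).
def Pre_fix_index (Reference : String) (Raw_reference : String) (Guide_index : Int) : Prop :=
  Guide_index ≤ (Raw_reference.toList.length : Int) ∧
    (Raw_reference.toList.take Guide_index.toNat).Sublist Reference.toList
instance (Reference : String) (Raw_reference : String) (Guide_index : Int) : Decidable (Pre_fix_index Reference Raw_reference Guide_index) := by unfold Pre_fix_index; infer_instance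
def pvWitness_fix_index : String × String × Int := ("ACGT", "AG", 2)

def Spec_fix_index (Reference : String) (Raw_reference : String) (Guide_index : Int) (out : Int) : Prop := out = fix_index_alt Reference Raw_reference Guide_index
instance (Reference : String) (Raw_reference : String) (Guide_index : Int) (out : Int) : Decidable (Spec_fix_index Reference Raw_reference Guide_index out) := by unfold Spec_fix_index; infer_instance

-- ===== CLAIM (what is proved, stated in full; the proofs are below) =====
def Claim_equal_fix_index : Prop := ∀ (Reference : String) (Raw_reference : String) (Guide_index : Int), Dom_fix_index Reference Raw_reference Guide_index → Pre_fix_index Reference Raw_reference Guide_index → Spec_fix_index Reference Raw_reference Guide_index (fix_index Reference Raw_reference Guide_index)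

-- ===== LEMMAS AND PROOFS =====

-- proof-side view of the occurrence lists: positions (offset ofs) of c in l, in order
def pvPosFrom (l : List Char) (c : Char) (ofs : Int) : List Int :=
  match l with
  | [] => []
  | x :: xs => if x = c then ofs :: pvPosFrom xs c (ofs + 1) else pvPosFrom xs c (ofs + 1)

theorem pvPosFrom_enum (l : List Char) (c : Char) (s : Int) :
    (((PySem.List.enumerate l s).map Prod.swap).filter (fun p => p.1 == c)).map (·.2)
      = pvPosFrom l c s := by
  induction l generalizing s with
  | nil => simp [PySem.List.enumerate_nil, pvPosFrom]
  | cons x xs ih =>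
    by_cases h : x = c <;>
      simp [PySem.List.enumerate_cons, pvPosFrom, h, ih]

theorem pvPosDict_getD (l : List Char) (c : Char) :
    (pvPosDict l).getD c [] = pvPosFrom l c 0 := by
  unfold pvPosDict
  have hmap : ((PySem.List.enumerate l 0).map Prod.swap).foldl
      (fun d p => d.modify p.1 [] (· ++ [p.2])) PySem.Dict.empty
      = (PySem.List.enumerate l 0).foldl
      (fun d p => d.modify p.2 [] (· ++ [p.1])) PySem.Dict.empty := by
    rw [List.foldl_map]
    rfl
  rw [← hmap, PySem.Dict.getD_foldl_modify_append, PySem.Dict.getD_empty]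
  simpa using pvPosFrom_enum l c 0

theorem pvPosFrom_append (xs ys : List Char) (c : Char) (ofs : Int) :
    pvPosFrom (xs ++ ys) c ofs = pvPosFrom xs c ofs ++ pvPosFrom ys c (ofs + xs.length) := by
  induction xs generalizing ofs with
  | nil => simp [pvPosFrom]
  | cons x xs ih =>
    by_cases h : x = c <;>
      simp [pvPosFrom, h, ih, List.length_cons] <;>
      ring_nf
  -- ring_nf aligns ofs + 1 + ↑len = ofs + (↑len + 1)

theorem mem_pvPosFrom_lt (xs : List Char) (c : Char) : ∀ (ofs p : Int),
    p ∈ pvPosFrom xs c ofs → p < ofs + xs.length := by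
  induction xs with
  | nil => intro ofs p hp; simp [pvPosFrom] at hp
  | cons x xs ih =>
    intro ofs p hp
    have hlen : (((x :: xs).length : Nat) : Int) = (xs.length : Int) + 1 := by
      push_cast [List.length_cons]; ring
    rw [hlen]
    by_cases h : x = c
    · rw [pvPosFrom, if_pos h] at hp
      rcases List.mem_cons.mp hp with rfl | hp'
      · have : (0 : Int) ≤ (xs.length : Int) := by positivity
        omega
      · have := ih (ofs + 1) p hp'; omega
    · rw [pvPosFrom, if_neg h] at hp
      have := ih (ofs + 1) p hp; omega

theorem pvScan_append_lt (xs ys : List Int) (i : Int) (h : ∀ p ∈ xs, p < i) :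
    pvScan (xs ++ ys) i = pvScan ys i := by
  induction xs with
  | nil => simp
  | cons x xs ih =>
    have hx : x < i := h x (by simp)
    simp [pvScan, hx]
    exact ih (fun p hp => h p (by simp [hp]))

-- the combined step lemma: one matched character advances both programs to the same state
theorem pvStep (l : List Char) (c : Char) (i : Int) (h : c ∈ l) :
    ∃ m : Nat, m < l.length ∧
      pvSkipA l c i = (i + (m : Int) + 1, l.drop (m + 1)) ∧
      (∃ rest, pvPosFrom l c i = (i + (m : Int)) :: rest) ∧
      (∀ cs : List Char, (c :: cs).Sublist l → cs.Sublist (l.drop (m + 1))) := by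
  induction l generalizing i with
  | nil => simp at h
  | cons x xs ih =>
    by_cases hx : x = c
    · refine ⟨0, by simp, ?_, ?_, ?_⟩
      · simp [pvSkipA, hx]
      · exact ⟨pvPosFrom xs c (i + 1), by simp [pvPosFrom, hx]⟩
      · intro cs hcs
        subst hx
        cases hcs with
        | cons _ h' => exact (List.sublist_cons_self _ _).trans h'
        | cons₂ _ h' => simpa using h'
    · have hc : c ∈ xs := by
        rcases List.mem_cons.mp h with rfl | h'
        · exact absurd rfl hx
        · exact h'
      obtain ⟨m, hm, hskip, ⟨rest, hpos⟩, hsub⟩ := ih (i + 1) hc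
      refine ⟨m + 1, by simpa using Nat.succ_lt_succ hm, ?_, ?_, ?_⟩
      · have h1 : pvSkipA (x :: xs) c i = pvSkipA xs c (i + 1) := by
          simp [pvSkipA, hx]
        rw [h1, hskip, Prod.mk.injEq]
        refine ⟨by push_cast; ring, ?_⟩
        rw [List.drop_succ_cons]
      · refine ⟨rest, ?_⟩
        have h1 : pvPosFrom (x :: xs) c i = pvPosFrom xs c (i + 1) := by
          simp [pvPosFrom, hx]
        rw [h1, hpos]
        congr 1
        push_cast; ring
      · intro cs hcs
        have h' : (c :: cs).Sublist xs := by
          cases hcs with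
          | cons _ h' => exact h'
          | cons₂ _ h' => exact absurd rfl hx
        rw [List.drop_succ_cons]
        exact hsub cs h'

-- main invariant: after matching a prefix, A sits at suffix drop n with counter n,
-- B scans the absolute occurrence lists with the same counter n
theorem pvMain (L : List Char) (raw : List Char) (n : Nat)
    (hn : n ≤ L.length) (hsub : raw.Sublist (L.drop n)) :
    pvGoA (L.drop n) raw (n : Int) = pvGoB raw (pvPosDict L) (n : Int) := by
  induction raw generalizing n with
  | nil => simp [pvGoA, pvGoB]
  | cons c cs ih =>
    have hc : c ∈ L.drop n := hsub.subset (by simp)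
    obtain ⟨m, hm, hskip, ⟨rest, hpos⟩, hstep⟩ := pvStep (L.drop n) c (n : Int) hc
    have hlen : (L.drop n).length = L.length - n := by simp
    have hn' : n + m + 1 ≤ L.length := by omega
    have hd : (L.drop n).drop (m + 1) = L.drop (n + m + 1) := by
      rw [List.drop_drop, ← Nat.add_assoc]
    have hi : (n : Int) + (m : Int) + 1 = ((n + m + 1 : Nat) : Int) := by push_cast; ring
    -- A side
    have hA : pvGoA (L.drop n) (c :: cs) (n : Int) =
        pvGoA (L.drop (n + m + 1)) cs ((n + m + 1 : Nat) : Int) := by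
      show pvGoA (pvSkipA (L.drop n) c (n : Int)).2 cs (pvSkipA (L.drop n) c (n : Int)).1 = _
      rw [hskip, hd, hi]
    -- B side: split the absolute occurrence list at position n
    have hBscan : pvScan ((pvPosDict L).getD c []) (n : Int) = ((n + m + 1 : Nat) : Int) := by
      rw [pvPosDict_getD]
      have hLsplit : L = L.take n ++ L.drop n := (List.take_append_drop n L).symm
      have htlen : (L.take n).length = n := by simp [hn]
      conv_lhs => rw [hLsplit]
      rw [pvPosFrom_append, htlen]
      have hskip' : pvScan (pvPosFrom (L.take n) c 0 ++ pvPosFrom (L.drop n) c (0 + (n : Int))) (n : Int)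
          = pvScan (pvPosFrom (L.drop n) c (0 + (n : Int))) (n : Int) := by
        apply pvScan_append_lt
        intro p hp
        have := mem_pvPosFrom_lt (L.take n) c 0 p hp
        rw [htlen] at this
        omega
      rw [hskip']
      have h0n : (0 : Int) + (n : Int) = (n : Int) := by ring
      rw [h0n, hpos]
      have hlt : ¬ ((n : Int) + (m : Int) < (n : Int)) := by omega
      show (if (n : Int) + (m : Int) < (n : Int) then pvScan rest (n : Int) else (n : Int) + (m : Int) + 1) = _
      rw [if_neg hlt, hi]
    have hB : pvGoB (c :: cs) (pvPosDict L) (n : Int) =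
        pvGoB cs (pvPosDict L) ((n + m + 1 : Nat) : Int) := by
      show pvGoB cs (pvPosDict L) (pvScan ((pvPosDict L).getD c []) (n : Int)) = _
      rw [hBscan]
    rw [hA, hB]
    exact ih (n + m + 1) hn' (by rw [← hd]; exact hstep cs hsub)

-- ===== VERDICT (by name: the statement is the Claim_ definition above) =====
theorem fix_index_spec : Claim_equal_fix_index := by
  intro Reference Raw_reference Guide_index _ hpre
  unfold Spec_fix_index fix_index fix_index_alt
  have := pvMain Reference.toList (Raw_reference.toList.take Guide_index.toNat) 0
    (Nat.zero_le _) (by simpa using hpre.2)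
  simpa using this
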